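-- pv_equiv track=rewrite | github.com/dave3680/CS2006 | code/distorted_ints.py | IsQuasiDistributiveDistortedMultiplication
-- ===== SOURCE A (Python) =====
-- class DistortedInt:
--     """Class to hold one distorted integer"""
--
--     def __init__(self, x, n, a):
--         """new distorted int
--         arguments must be integers
--         n must be positive"""
--         # check types of args
--         if type(x) != int or type(a) != int or type(n) != int:
--             raise TypeError("arguments of DistortedInt must be integers")
--         # check n > 0
--         if n <= 0:
--             raise ValueError("n must be positive")
--         # if ok, setup val, take mod n in case out of bounds
--         self.x = x % n
--         self.a = a % n
--         self.n = n
--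
--     def __str__(self):
--         """turn distorted int into a string
--         <x mod n | a>"""
--         return "<" + str(self.x) + " mod " + str(self.n) + " | " + str(self.a) + ">"
--
--     def __repr__(self):
--         """return representation of object
--         same as to string method"""
--         return str(self)
--
--     def __mul__(self, other):
--         """apply distorted multiplication
--         x * y = (ax + (1 - a)y) mod n
--         a and n must be same for both arguments"""
--         # check a, n same
--         if self.a != other.a or self.n != other.n:
--             raise ValueError("a and n of both arguments must be equal")
--         # new x = (ax + (1-a)y) mod n
--         x = ((self.a * self.x) + ((1 - self.a) * other.x))
--         return DistortedInt(x, self.n, self.a)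
--
--     def __eq__(self, other):
--         """Check if this object is equal to another
--         Compares x, a and n"""
--         return self.x == other.x and self.a == other.a and self.n == other.n
--
-- def IsQuasiDistributiveDistortedMultiplication(n, alpha):
--     """Tests if (x*y)*z = (x*y)*(x*z) for all x,y,z in Zn
--     n > 0"""
--     if n <= 0:
--         raise ValueError("n must be greater than 0")
--     for x in range(n):
--         for y in range(n):
--             for z in range(n):
--                 xdi = DistortedInt(x, n, alpha)
--                 ydi = DistortedInt(y, n, alpha)
--                 zdi = DistortedInt(z, n, alpha)
--                 if ((xdi * ydi) * zdi) != ((xdi * ydi) * (xdi * zdi)):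
--                     return False
--     return True
-- ===== SOURCE B (Python) =====
-- def IsQuasiDistributiveDistortedMultiplication(n, alpha):
--     """Tests if (x*y)*z = (x*y)*(x*z) for all x,y,z in Zn (distorted product
--     x*y = (a*x + (1-a)*y) mod n).  Closed form: the identity reduces to
--     n | a*(1-a)*(x-z), which holds for all x,z iff n divides alpha*(1-alpha)."""
--     if n <= 0:
--         raise ValueError("n must be greater than 0")
--     return (alpha * (1 - alpha)) % n == 0
-- ===== Notes on version B (the rewrite author's own statement) =====
-- stated objective: faster
-- what changed: Replaced the triple loop over Z_n^3 with the algebraic closed form: quasi-distributivity holds iff alpha*(1-alpha) is divisible by n.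
import Mathlib
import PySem

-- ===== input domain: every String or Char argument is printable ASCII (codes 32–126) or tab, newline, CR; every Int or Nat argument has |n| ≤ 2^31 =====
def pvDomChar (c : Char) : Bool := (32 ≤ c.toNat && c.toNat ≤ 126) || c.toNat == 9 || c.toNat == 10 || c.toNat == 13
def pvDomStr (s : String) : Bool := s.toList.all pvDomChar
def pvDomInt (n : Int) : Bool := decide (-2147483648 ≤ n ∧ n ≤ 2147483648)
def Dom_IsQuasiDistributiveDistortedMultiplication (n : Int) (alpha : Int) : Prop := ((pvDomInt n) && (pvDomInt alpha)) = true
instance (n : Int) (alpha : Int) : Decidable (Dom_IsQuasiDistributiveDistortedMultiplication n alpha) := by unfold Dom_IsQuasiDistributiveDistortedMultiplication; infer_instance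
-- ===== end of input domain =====

-- B replaces A's O(n^3) brute-force search over Z_n^3 by the closed-form divisibility test
-- n ∣ alpha*(1-alpha) (objective: faster, asymptotic).

-- ===== PORT A =====
-- A DistortedInt(x, n, a) with n > 0 is the triple (x % n, a % n, n).
def pvMkDI (x : Int) (n : Int) (a : Int) : Int × Int × Int :=
  (PySem.Int.mod x n, PySem.Int.mod a n, n)

-- __mul__: new x = a*self.x + (1-a)*other.x, re-wrapped by the constructor.
def pvDMul (d e : Int × Int × Int) : Int × Int × Int :=
  pvMkDI (d.2.1 * d.1 + (1 - d.2.1) * e.1) d.2.2 d.2.1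

-- The three 'for … in range(n)' loops, transliterated as lazy counter recursions so that the
-- early 'return False' short-circuits exactly as in Python (range is lazy there).
def pvCond (n alpha x y z : Int) : Bool :=
  let xdi := pvMkDI x n alpha
  let ydi := pvMkDI y n alpha
  let zdi := pvMkDI z n alpha
  pvDMul (pvDMul xdi ydi) zdi == pvDMul (pvDMul xdi ydi) (pvDMul xdi zdi)

def pvLoopZ (n alpha x y z : Int) : Bool :=
  if z < n then (if pvCond n alpha x y z then pvLoopZ n alpha x y (z + 1) else false) else true
termination_by (n - z).toNat
decreasing_by omega

def pvLoopY (n alpha x y : Int) : Bool :=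
  if y < n then (if pvLoopZ n alpha x y 0 then pvLoopY n alpha x (y + 1) else false) else true
termination_by (n - y).toNat
decreasing_by omega

def pvLoopX (n alpha x : Int) : Bool :=
  if x < n then (if pvLoopY n alpha x 0 then pvLoopX n alpha (x + 1) else false) else true
termination_by (n - x).toNat
decreasing_by omega

def IsQuasiDistributiveDistortedMultiplication (n : Int) (alpha : Int) : Bool :=
  pvLoopX n alpha 0

-- ===== PORT B =====
def IsQuasiDistributiveDistortedMultiplication_alt (n : Int) (alpha : Int) : Bool :=
  PySem.Int.mod (alpha * (1 - alpha)) n == 0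

-- ===== PRECONDITION & SPEC =====
-- A (and B) raise ValueError when n ≤ 0.
def Pre_IsQuasiDistributiveDistortedMultiplication (n : Int) (alpha : Int) : Prop := 0 < n
instance (n : Int) (alpha : Int) : Decidable (Pre_IsQuasiDistributiveDistortedMultiplication n alpha) := by unfold Pre_IsQuasiDistributiveDistortedMultiplication; infer_instance
def pvWitness_IsQuasiDistributiveDistortedMultiplication : Int × Int := (6, 3)

def Spec_IsQuasiDistributiveDistortedMultiplication (n : Int) (alpha : Int) (out : Bool) : Prop := out = IsQuasiDistributiveDistortedMultiplication_alt n alpha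
instance (n : Int) (alpha : Int) (out : Bool) : Decidable (Spec_IsQuasiDistributiveDistortedMultiplication n alpha out) := by unfold Spec_IsQuasiDistributiveDistortedMultiplication; infer_instance

-- ===== CLAIM (what is proved, stated in full; the proofs are below) =====
def Claim_equal_IsQuasiDistributiveDistortedMultiplication : Prop := ∀ (n : Int) (alpha : Int), Dom_IsQuasiDistributiveDistortedMultiplication n alpha → Pre_IsQuasiDistributiveDistortedMultiplication n alpha → Spec_IsQuasiDistributiveDistortedMultiplication n alpha (IsQuasiDistributiveDistortedMultiplication n alpha)

-- ===== LEMMAS AND PROOFS =====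

-- One body of the triple loop, for x, z in range(n): the tested identity holds iff n ∣ alpha*(1-alpha)*(x-z).
theorem pv_cond_iff (n alpha x y z : Int) (hn : 0 < n)
    (hx0 : 0 ≤ x) (hxn : x < n) (hz0 : 0 ≤ z) (hzn : z < n) :
    pvCond n alpha x y z = true ↔ n ∣ alpha * (1 - alpha) * (x - z) := by
  unfold pvCond
  have hmod : ∀ m : Int, PySem.Int.mod m n = m % n := fun m => PySem.Int.mod_eq_emod_of_pos hn
  have hxx : x % n = x := Int.emod_eq_of_lt hx0 hxn
  have hzz : z % n = z := Int.emod_eq_of_lt hz0 hzn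
  simp only [pvDMul, pvMkDI, hmod, hxx, hzz, beq_iff_eq, Prod.mk.injEq, and_true]
  rw [Int.emod_emod_of_dvd alpha dvd_rfl]
  set a := alpha % n with ha
  set w := (a * x + (1 - a) * (y % n)) % n with hw
  constructor
  · intro h
    -- h : (a*w + (1-a)*z) % n = (a*w + (1-a)*((a*x+(1-a)*z) % n)) % n
    have h1 : (a * w + (1 - a) * z) ≡ (a * w + (1 - a) * ((a * x + (1 - a) * z) % n)) [ZMOD n] := h
    have h2 : (a * x + (1 - a) * z) % n ≡ a * x + (1 - a) * z [ZMOD n] := Int.emod_emod_of_dvd _ dvd_rfl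
    have h3 : (a * w + (1 - a) * z) ≡ (a * w + (1 - a) * (a * x + (1 - a) * z)) [ZMOD n] :=
      h1.trans ((Int.ModEq.refl (a * w)).add (h2.mul_left (1 - a)))
    have h4 : n ∣ (a * w + (1 - a) * (a * x + (1 - a) * z)) - (a * w + (1 - a) * z) :=
      Int.ModEq.dvd h3
    have h5 : (a * w + (1 - a) * (a * x + (1 - a) * z)) - (a * w + (1 - a) * z)
        = a * (1 - a) * (x - z) := by ring
    rw [h5] at h4
    -- transfer a = alpha % n back to alpha
    have h6 : a * (1 - a) * (x - z) ≡ alpha * (1 - alpha) * (x - z) [ZMOD n] := by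
      have : a ≡ alpha [ZMOD n] := Int.emod_emod_of_dvd alpha dvd_rfl
      exact (this.mul ((Int.ModEq.refl 1).sub this)).mul (Int.ModEq.refl (x - z))
    exact (Int.modEq_zero_iff_dvd).mp (((Int.modEq_zero_iff_dvd).mpr h4).symm.trans h6).symm
  · intro h
    have h6 : alpha * (1 - alpha) * (x - z) ≡ a * (1 - a) * (x - z) [ZMOD n] := by
      have : alpha ≡ a [ZMOD n] := (Int.emod_emod_of_dvd alpha dvd_rfl).symm
      exact (this.mul ((Int.ModEq.refl 1).sub this)).mul (Int.ModEq.refl (x - z))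
    have h4 : n ∣ a * (1 - a) * (x - z) :=
      (Int.modEq_zero_iff_dvd).mp (h6.symm.trans ((Int.modEq_zero_iff_dvd).mpr h))
    have h2 : a * x + (1 - a) * z ≡ (a * x + (1 - a) * z) % n [ZMOD n] :=
      (Int.emod_emod_of_dvd _ dvd_rfl).symm
    have h3 : (a * w + (1 - a) * z) ≡ (a * w + (1 - a) * (a * x + (1 - a) * z)) [ZMOD n] := by
      have : n ∣ (a * w + (1 - a) * (a * x + (1 - a) * z)) - (a * w + (1 - a) * z) := by
        have e : (a * w + (1 - a) * (a * x + (1 - a) * z)) - (a * w + (1 - a) * z)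
            = a * (1 - a) * (x - z) := by ring
        rw [e]; exact h4
      exact (Int.modEq_iff_dvd.mpr this)
    exact h3.trans ((Int.ModEq.refl (a * w)).add (h2.mul_left (1 - a)))

theorem pv_loopZ_iff (n alpha x y z : Int) :
    pvLoopZ n alpha x y z = true ↔ ∀ w, z ≤ w → w < n → pvCond n alpha x y w = true := by
  fun_induction pvLoopZ n alpha x y z with
  | case1 z h hc ih =>
    simp only [ih]
    constructor
    · intro hall w hzw hwn
      rcases eq_or_lt_of_le hzw with rfl | h1
      · exact hc
      · exact hall w (by omega) hwn
    · intro hall w hzw hwn; exact hall w (by omega) hwn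
  | case2 z h hc =>
    simp only [Bool.false_eq_true, false_iff, not_forall]
    exact ⟨z, le_refl z, h, by simp [hc]⟩
  | case3 z h =>
    simp only [true_iff]; intro w hzw hwn; omega

theorem pv_loopY_iff (n alpha x y : Int) :
    pvLoopY n alpha x y = true ↔ ∀ v, y ≤ v → v < n → pvLoopZ n alpha x v 0 = true := by
  fun_induction pvLoopY n alpha x y with
  | case1 y h hc ih =>
    simp only [ih]
    constructor
    · intro hall v hyv hvn
      rcases eq_or_lt_of_le hyv with rfl | h1
      · exact hc
      · exact hall v (by omega) hvn
    · intro hall v hyv hvn; exact hall v (by omega) hvn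
  | case2 y h hc =>
    simp only [Bool.false_eq_true, false_iff, not_forall]
    exact ⟨y, le_refl y, h, by simp [hc]⟩
  | case3 y h =>
    simp only [true_iff]; intro v hyv hvn; omega

theorem pv_loopX_iff (n alpha x : Int) :
    pvLoopX n alpha x = true ↔ ∀ u, x ≤ u → u < n → pvLoopY n alpha u 0 = true := by
  fun_induction pvLoopX n alpha x with
  | case1 x h hc ih =>
    simp only [ih]
    constructor
    · intro hall u hxu hun
      rcases eq_or_lt_of_le hxu with rfl | h1
      · exact hc
      · exact hall u (by omega) hun
    · intro hall u hxu hun; exact hall u (by omega) hun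
  | case2 x h hc =>
    simp only [Bool.false_eq_true, false_iff, not_forall]
    exact ⟨x, le_refl x, h, by simp [hc]⟩
  | case3 x h =>
    simp only [true_iff]; intro u hxu hun; omega

theorem pv_A_iff (n alpha : Int) (hn : 0 < n) :
    IsQuasiDistributiveDistortedMultiplication n alpha = true ↔ n ∣ alpha * (1 - alpha) := by
  unfold IsQuasiDistributiveDistortedMultiplication
  simp only [pv_loopX_iff, pv_loopY_iff, pv_loopZ_iff]
  constructor
  · intro h
    rcases eq_or_lt_of_le (by omega : (1:Int) ≤ n) with h1 | h1
    · exact h1 ▸ Int.one_dvd _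
    · have := (pv_cond_iff n alpha 1 0 0 hn (by omega) (by omega) (by omega) (by omega)).mp
        (h 1 (by omega) (by omega) 0 (by omega) (by omega) 0 (by omega) (by omega))
      simpa using this
  · intro h u hu0 hun v hv0 hvn w hw0 hwn
    exact (pv_cond_iff n alpha u v w hn (by omega) (by omega) (by omega) (by omega)).mpr
      (h.mul_right (u - w))

theorem pv_B_iff (n alpha : Int) :
    IsQuasiDistributiveDistortedMultiplication_alt n alpha = true ↔ n ∣ alpha * (1 - alpha) := by
  unfold IsQuasiDistributiveDistortedMultiplication_alt
  rw [beq_iff_eq]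
  exact PySem.Int.mod_eq_zero_iff_dvd _ _

-- ===== VERDICT (by name: the statement is the Claim_ definition above) =====
theorem IsQuasiDistributiveDistortedMultiplication_spec : Claim_equal_IsQuasiDistributiveDistortedMultiplication := by
  intro n alpha _ hn
  unfold Spec_IsQuasiDistributiveDistortedMultiplication
  have := (pv_A_iff n alpha hn).trans (pv_B_iff n alpha).symm
  cases hA : IsQuasiDistributiveDistortedMultiplication n alpha <;>
    cases hB : IsQuasiDistributiveDistortedMultiplication_alt n alpha <;>
      simp_all
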